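-- pv_equiv track=rewrite | github.com/dangcongty/fall_detection | eval.py | extract_intervals
-- ===== SOURCE A (Python) =====
-- def extract_intervals(frame_preds):
--     intervals = []
--     start = None
--     for i, val in enumerate(frame_preds):
--         if val == 1 and start is None:
--             start = i
--         elif val == 0 and start is not None:
--             intervals.append((start, i - 1))
--             start = None
--     if start is not None:
--         intervals.append((start, len(frame_preds) - 1))
--     return intervals
-- ===== SOURCE B (Python) =====
-- def extract_intervals(frame_preds):
--     # Jump-search version: repeatedly locate the next 1 (run start) and the
--     # first 0 after it (run end) with list.index, instead of a per-element
--     # state machine. Values other than 0/1 are skipped by the searches, so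
--     # they never break a run; an unterminated run ends at len-1.
--     intervals = []
--     n = len(frame_preds)
--     i = 0
--     while True:
--         try:
--             s = frame_preds.index(1, i)
--         except ValueError:
--             break
--         try:
--             e = frame_preds.index(0, s + 1)
--         except ValueError:
--             intervals.append((s, n - 1))
--             break
--         intervals.append((s, e - 1))
--         i = e + 1
--     return intervals
-- ===== Notes on version B (the rewrite author's own statement) =====
-- stated objective: alternative
-- what changed: Replaced the per-element two-flag state machine with an index-jumping search: repeatedly list.index the next 1 (run start) and the first 0 after it (run end), emitting intervals directly.
import Mathlib
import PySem

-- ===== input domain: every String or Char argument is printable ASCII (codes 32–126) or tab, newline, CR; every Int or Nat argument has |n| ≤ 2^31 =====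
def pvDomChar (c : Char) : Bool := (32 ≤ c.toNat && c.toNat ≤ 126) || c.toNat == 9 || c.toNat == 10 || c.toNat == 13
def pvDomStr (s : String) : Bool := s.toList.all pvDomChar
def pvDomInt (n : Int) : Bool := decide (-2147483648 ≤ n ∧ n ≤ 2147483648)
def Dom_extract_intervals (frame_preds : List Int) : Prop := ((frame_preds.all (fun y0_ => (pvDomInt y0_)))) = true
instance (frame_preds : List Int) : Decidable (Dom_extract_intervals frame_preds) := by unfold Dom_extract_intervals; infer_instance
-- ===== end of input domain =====

-- B replaces A's per-element state machine by an index-jumping search (list.index for the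
-- next 1 then the first 0 after it); same O(n) cost, different decomposition.

-- ===== PORT A =====
-- the loop body of A's for-loop over enumerate(frame_preds)
def stepA (st : List (Int × Int) × Option Int) (iv : Int × Int) : List (Int × Int) × Option Int :=
  if iv.2 = 1 ∧ st.2 = none then (st.1, some iv.1)
  else if iv.2 = 0 ∧ st.2 ≠ none then (st.1 ++ [(st.2.getD 0, iv.1 - 1)], none)
  else st

def extract_intervals (frame_preds : List Int) : List (Int × Int) :=
  let r := (PySem.List.enumerate frame_preds).foldl stepA ([], none)
  match r.2 with
  | some s => r.1 ++ [(s, (frame_preds.length : Int) - 1)]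
  | none => r.1

-- ===== PORT B =====
-- frame_preds.index(tgt, i): first absolute index ≥ i holding tgt (none = ValueError)
def findAux (l : List Int) (tgt : Int) (i : Nat) : Option Nat :=
  match l with
  | [] => none
  | v :: t => if v = tgt then some i else findAux t tgt (i + 1)

def findFrom (xs : List Int) (tgt : Int) (i : Nat) : Option Nat :=
  findAux (xs.drop i) tgt i

theorem findFrom_some_bounds {xs : List Int} {tgt : Int} {i k : Nat}
    (h : findFrom xs tgt i = some k) : i ≤ k ∧ k < xs.length := by
  have aux : ∀ (l : List Int) (j m : Nat), findAux l tgt j = some m → j ≤ m ∧ m < j + l.length := by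
    intro l
    induction l with
    | nil => intro j m h; simp [findAux] at h
    | cons v t ih =>
      intro j m h
      simp only [findAux] at h
      split at h
      · cases h; simp
      · have := ih (j + 1) m h
        constructor <;> [omega; (simp only [List.length_cons]; omega)]
  unfold findFrom at h
  have h2 := aux _ _ _ h
  have hlen := List.length_drop (i := i) (l := xs)
  by_cases hi : i ≤ xs.length
  · omega
  · rw [List.drop_eq_nil_of_le (by omega)] at h
    simp [findAux] at h

-- B's while-loop: find next 1 from i, then first 0 after it
def goB (xs : List Int) (n : Nat) (i : Nat) : List (Int × Int) :=
  match h1 : findFrom xs 1 i with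
  | none => []
  | some s =>
    match h2 : findFrom xs 0 (s + 1) with
    | none => [((s : Int), (n : Int) - 1)]
    | some e => ((s : Int), (e : Int) - 1) :: goB xs n (e + 1)
termination_by xs.length - i
decreasing_by
  have b1 := findFrom_some_bounds h1
  have b2 := findFrom_some_bounds h2
  omega

def extract_intervals_alt (frame_preds : List Int) : List (Int × Int) :=
  goB frame_preds frame_preds.length 0

-- ===== PRECONDITION & SPEC =====
def Spec_extract_intervals (frame_preds : List Int) (out : List (Int × Int)) : Prop := out = extract_intervals_alt frame_preds
instance (frame_preds : List Int) (out : List (Int × Int)) : Decidable (Spec_extract_intervals frame_preds out) := by unfold Spec_extract_intervals; infer_instance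

-- ===== CLAIM (what is proved, stated in full; the proofs are below) =====
def Claim_equal_extract_intervals : Prop := ∀ (frame_preds : List Int), Dom_extract_intervals frame_preds → Spec_extract_intervals frame_preds (extract_intervals frame_preds)

-- ===== LEMMAS AND PROOFS =====

-- A's loop as a recursion on the remaining list (index i, current start state),
-- including the final flush of an open run
def loopA (nI : Int) : List Int → Int → Option Int → List (Int × Int)
  | [], _, none => []
  | [], _, some s => [(s, nI - 1)]
  | v :: t, i, none => if v = 1 then loopA nI t (i + 1) (some i) else loopA nI t (i + 1) none
  | v :: t, i, some s => if v = 0 then (s, i - 1) :: loopA nI t (i + 1) none else loopA nI t (i + 1) (some s)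

def flushA (nI : Int) (r : List (Int × Int) × Option Int) : List (Int × Int) :=
  match r.2 with
  | some s => r.1 ++ [(s, nI - 1)]
  | none => r.1

theorem fold_eq_loopA (nI : Int) (t : List Int) :
    ∀ (i : Int) (acc : List (Int × Int)) (st : Option Int),
      flushA nI ((PySem.List.enumerate t i).foldl stepA (acc, st)) = acc ++ loopA nI t i st := by
  induction t with
  | nil =>
    intro i acc st
    cases st <;> simp [PySem.List.enumerate_nil, flushA, loopA]
  | cons v t ih =>
    intro i acc st
    rw [PySem.List.enumerate_cons, List.foldl_cons]
    cases st with
    | none =>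
      by_cases hv : v = 1
      · simp only [stepA, hv, loopA]
        simpa using ih (i + 1) acc (some i)
      · have : stepA (acc, none) (i, v) = (acc, none) := by
          simp [stepA, hv]
        rw [this, ih, loopA, if_neg hv]
    | some s =>
      by_cases hv : v = 0
      · have : stepA (acc, some s) (i, v) = (acc ++ [(s, i - 1)], none) := by
          simp [stepA, hv]
        rw [this, ih, loopA, if_pos hv, List.append_assoc, List.singleton_append]
      · have : stepA (acc, some s) (i, v) = (acc, some s) := by
          by_cases hv1 : v = 1 <;> simp [stepA, hv, hv1]
        rw [this, ih, loopA, if_neg hv]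

theorem extract_intervals_eq_loopA (xs : List Int) :
    extract_intervals xs = loopA ((xs.length : Int)) xs 0 none := by
  have h := fold_eq_loopA ((xs.length : Int)) xs 0 [] none
  simpa [extract_intervals, flushA] using h

-- while in the "off" state, loopA just scans for the next 1
theorem loopA_off (xs : List Int) (nI : Int) (i : Nat) :
    loopA nI (xs.drop i) (i : Int) none =
      match findFrom xs 1 i with
      | none => []
      | some s => loopA nI (xs.drop (s + 1)) (((s + 1 : Nat) : Int)) (some (s : Int)) := by
  by_cases hi : i < xs.length
  · rw [List.drop_eq_getElem_cons hi]
    by_cases hv : xs[i] = 1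
    · have hf : findFrom xs 1 i = some i := by
        rw [findFrom, List.drop_eq_getElem_cons hi]
        simp [findAux, hv]
      rw [hf, loopA, if_pos hv]
      push_cast
      try rfl
    · have hf : findFrom xs 1 i = findFrom xs 1 (i + 1) := by
        rw [findFrom, List.drop_eq_getElem_cons hi]
        simp [findAux, hv, findFrom]
      rw [hf, loopA, if_neg hv]
      have h := loopA_off xs nI (i + 1)
      push_cast at h ⊢
      try exact h
  · rw [List.drop_eq_nil_of_le (by omega)]
    have hf : findFrom xs 1 i = none := by
      rw [findFrom, List.drop_eq_nil_of_le (by omega)]; rfl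
    rw [hf, loopA]
termination_by xs.length - i

-- while in the "on" state, loopA just scans for the next 0
theorem loopA_on (xs : List Int) (nI : Int) (i : Nat) (s : Int) :
    loopA nI (xs.drop i) (i : Int) (some s) =
      match findFrom xs 0 i with
      | none => [(s, nI - 1)]
      | some e => (s, (e : Int) - 1) :: loopA nI (xs.drop (e + 1)) (((e + 1 : Nat) : Int)) none := by
  by_cases hi : i < xs.length
  · rw [List.drop_eq_getElem_cons hi]
    by_cases hv : xs[i] = 0
    · have hf : findFrom xs 0 i = some i := by
        rw [findFrom, List.drop_eq_getElem_cons hi]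
        simp [findAux, hv]
      rw [hf, loopA, if_pos hv]
      push_cast
      try rfl
    · have hf : findFrom xs 0 i = findFrom xs 0 (i + 1) := by
        rw [findFrom, List.drop_eq_getElem_cons hi]
        simp [findAux, hv, findFrom]
      rw [hf, loopA, if_neg hv]
      have h := loopA_on xs nI (i + 1) s
      push_cast at h ⊢
      try exact h
  · rw [List.drop_eq_nil_of_le (by omega)]
    have hf : findFrom xs 0 i = none := by
      rw [findFrom, List.drop_eq_nil_of_le (by omega)]; rfl
    rw [hf, loopA]
termination_by xs.length - i

theorem goB_eq_loopA (xs : List Int) (i : Nat) :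
    goB xs xs.length i = loopA ((xs.length : Int)) (xs.drop i) (i : Int) none := by
  rw [loopA_off, goB]
  cases h1 : findFrom xs 1 i with
  | none => rfl
  | some s =>
    dsimp only
    rw [loopA_on]
    cases h2 : findFrom xs 0 (s + 1) with
    | none => rfl
    | some e =>
      dsimp only
      rw [goB_eq_loopA xs (e + 1)]
termination_by xs.length - i
decreasing_by
  have b1 := findFrom_some_bounds h1
  have b2 := findFrom_some_bounds h2
  omega

-- ===== VERDICT (by name: the statement is the Claim_ definition above) =====
theorem extract_intervals_spec : Claim_equal_extract_intervals := by
  intro xs _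
  unfold Spec_extract_intervals extract_intervals_alt
  rw [extract_intervals_eq_loopA, goB_eq_loopA]
  simp
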